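-- pv_equiv track=rewrite | github.com/jintak0401/Problem_Solving | 11727.py | solve
-- ===== SOURCE A (Python) =====
-- def solve(num):
--     MOD = 10007
--     dp = [0 for I in range(max(num + 1, 3))]
--     dp[1] = 1
--     dp[2] = 3
--     for i in range(3, num + 1):
--         dp[i] = (dp[i-2] * 2 + dp[i-1]) % MOD
--     return dp[num]
-- ===== SOURCE B (Python) =====
-- def solve(num):
--     # Closed form of the tiling recurrence f(n) = f(n-1) + 2*f(n-2), f(1)=1, f(2)=3:
--     # f(n) = (2**(n+1) + (-1)**n) / 3; computed mod 10007 with modular exponentiation.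
--     MOD = 10007
--     if num <= 0:
--         return 0
--     sign = 1 if num % 2 == 0 else MOD - 1
--     return (pow(2, num + 1, MOD) + sign) * 3336 % MOD  # 3336 = 3^(-1) mod 10007
-- ===== Notes on version B (the rewrite author's own statement) =====
-- stated objective: faster
-- what changed: Replaces the O(n) DP table with the closed form f(n) = (2^(n+1) + (-1)^n)/3 of the linear recurrence, evaluated mod 10007 by modular exponentiation (O(log n)); B returns 0 for non-positive widths.
-- intended difference: For num = -1 and num = -2 A's negative index wraps around the 3-element table and returns the counts for widths 2 and 1 (3 and 1); B returns 0, the intended count of tilings of a negative width. — e.g. on solve(-1): A returns 3, B returns 0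
import Mathlib
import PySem

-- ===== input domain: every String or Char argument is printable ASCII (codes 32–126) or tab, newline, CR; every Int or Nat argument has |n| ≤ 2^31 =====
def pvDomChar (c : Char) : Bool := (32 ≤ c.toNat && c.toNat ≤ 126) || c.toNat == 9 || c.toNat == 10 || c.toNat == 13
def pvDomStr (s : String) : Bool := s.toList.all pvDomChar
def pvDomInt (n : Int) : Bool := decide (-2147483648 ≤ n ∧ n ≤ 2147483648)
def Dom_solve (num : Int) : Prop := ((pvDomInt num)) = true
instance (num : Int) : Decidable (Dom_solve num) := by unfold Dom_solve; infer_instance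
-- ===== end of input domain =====

-- B replaces the O(n) DP table with the closed form (2^(n+1)+(-1)^n)/3 mod 10007 via
-- modular exponentiation (O(log n)); return-value equivalence only (A mutates nothing).

-- ===== PORT A =====
def solve (num : Int) : Int :=
  let MOD : Int := 10007
  let dp : Array Int := ((PySem.List.pyRange 0 (max (num + 1) 3) 1).map (fun _ => (0 : Int))).toArray
  let dp := dp.set! 1 1
  let dp := dp.set! 2 3
  -- loop indices i run over range(3, num+1), so i-2, i-1, i are nonnegative:
  -- Python's dp[i-2], dp[i-1], dp[i]=… are exact as Nat-indexed Array reads/writes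
  let dp := (PySem.List.pyRange 3 (num + 1) 1).foldl
    (fun d i => d.set! i.toNat
      (PySem.Int.mod (d.getD (i - 2).toNat 0 * 2 + d.getD (i - 1).toNat 0) MOD)) dp
  PySem.List.pyGetD dp.toList num 0

-- ===== PORT B =====
def solve_alt (num : Int) : Int :=
  let MOD : Int := 10007
  if num ≤ 0 then 0
  else
    let sign : Int := if PySem.Int.mod num 2 = 0 then 1 else MOD - 1
    PySem.Int.mod ((PySem.Int.powMod 2 (num + 1).toNat MOD + sign) * 3336) MOD

-- ===== PRECONDITION & SPEC =====
-- Pre_ admits exactly the inputs on which A returns (num ≤ -4 raises IndexError).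
def Pre_solve (num : Int) : Prop := -3 ≤ num
instance (num : Int) : Decidable (Pre_solve num) := by unfold Pre_solve; infer_instance
def pvWitness_solve : Int := 5

-- For num = -1 and num = -2 A's negative index wraps around the 3-element table and returns
-- the counts for widths 2 and 1 (3 and 1); B returns 0, the intended count for a negative width.
def D_solve (num : Int) : Prop := num = -1 ∨ num = -2
instance (num : Int) : Decidable (D_solve num) := by unfold D_solve; infer_instance

def Spec_solve (num : Int) (out : Int) : Prop := ¬ D_solve num → out = solve_alt num
instance (num : Int) (out : Int) : Decidable (Spec_solve num out) := by unfold Spec_solve; infer_instance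

def pvDiffWitness_solve : Int := -1
def pvDiffWitnessOut_solve : Int × Int := (3, 0)

-- ===== CLAIM (what is proved, stated in full; the proofs are below) =====
def Claim_unchanged_solve : Prop := ∀ (num : Int), Dom_solve num → Pre_solve num → Spec_solve num (solve num)
def Claim_changed_solve : Prop := Dom_solve (pvDiffWitness_solve) ∧ Pre_solve (pvDiffWitness_solve) ∧ D_solve (pvDiffWitness_solve) ∧ solve (pvDiffWitness_solve) = pvDiffWitnessOut_solve.1 ∧ solve_alt (pvDiffWitness_solve) = pvDiffWitnessOut_solve.2 ∧ pvDiffWitnessOut_solve.1 ≠ pvDiffWitnessOut_solve.2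
def Claim_exact_solve : Prop := ∀ (num : Int), Dom_solve num → Pre_solve num → D_solve num → solve num ≠ solve_alt num

-- ===== LEMMAS AND PROOFS =====

-- the recurrence A's loop computes
def gtile : Nat → Int
  | 0 => 0
  | 1 => 1
  | 2 => 3
  | (n + 3) => PySem.Int.mod (gtile (n + 1) * 2 + gtile (n + 2)) 10007

def initL (L : Nat) : List Int := ((List.replicate L (0 : Int)).set 1 1).set 2 3

def stepF (d : List Int) (i : Int) : List Int :=
  PySem.List.pySetD d i
    (PySem.Int.mod (PySem.List.pyGetD d (i - 2) 0 * 2 + PySem.List.pyGetD d (i - 1) 0) 10007)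

lemma initL_getD (L : Nat) (hL : 3 ≤ L) (j : Nat) :
    (initL L).getD j 0 = if j < 3 then gtile j else 0 := by
  unfold initL
  rw [List.getD_eq_getElem?_getD]
  simp [List.getElem?_set, List.getElem?_replicate]
  match j with
  | 0 => simp [show 0 < L by omega, gtile]
  | 1 => simp [show 1 < L by omega, gtile]
  | 2 => simp [show 2 < L by omega, gtile]
  | (n+3) => split <;> [omega; (split <;> [omega; (split <;> simp)])]

lemma loop_inv (L k : Nat) (h3 : 3 ≤ k) (hL : k ≤ L) :
    ((PySem.List.pyRange 3 (k : Int) 1).foldl stepF (initL L)).length = L ∧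
    ∀ j : Nat, ((PySem.List.pyRange 3 (k : Int) 1).foldl stepF (initL L)).getD j 0 =
      if j < k then gtile j else 0 := by
  induction k, h3 using Nat.le_induction with
  | base =>
    rw [show ((3:Nat):Int) = 3 by norm_num, PySem.List.pyRange_one_eq_nil (by omega)]
    refine ⟨by simp [initL], fun j => ?_⟩
    simpa using initL_getD L (by omega) j
  | succ k hk ih =>
    obtain ⟨ihlen, ihget⟩ := ih (by omega)
    set r := (PySem.List.pyRange 3 (k : Int) 1).foldl stepF (initL L) with hr
    have hrange : PySem.List.pyRange 3 ((k+1 : Nat) : Int) 1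
        = PySem.List.pyRange 3 (k : Int) 1 ++ [(k : Int)] := by
      push_cast
      exact PySem.List.pyRange_one_succ_right (by exact_mod_cast by omega)
    rw [hrange, List.foldl_append]
    simp only [List.foldl_cons, List.foldl_nil, ← hr]
    have h2 : ((k : Int) - 2) = ((k - 2 : Nat) : Int) := by omega
    have h1 : ((k : Int) - 1) = ((k - 1 : Nat) : Int) := by omega
    have hval : stepF r (k : Int) = r.set k (gtile k) := by
      unfold stepF
      rw [h2, h1]
      simp only [PySem.List.pyGetD_natCast, PySem.List.pySetD_natCast]
      rw [ihget (k-2), ihget (k-1), if_pos (by omega), if_pos (by omega)]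
      have hk3 : k = (k - 3) + 3 := by omega
      rw [hk3, show (k-3)+3-2 = (k-3)+1 by omega, show (k-3)+3-1 = (k-3)+2 by omega]
      rfl
    rw [hval]
    refine ⟨by simpa using ihlen, fun j => ?_⟩
    rw [List.getD_eq_getElem?_getD, List.getElem?_set]
    by_cases hjk : k = j
    · subst hjk
      rw [if_pos rfl, if_pos (by omega)]
      simp
    · rw [if_neg hjk, ← List.getD_eq_getElem?_getD, ihget j]
      by_cases hjlt : j < k
      · rw [if_pos hjlt, if_pos (by omega)]
      · rw [if_neg hjlt, if_neg (by omega)]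

lemma pyGetD_nonneg_getD (xs : List Int) (i : Int) (d : Int) (h : 0 ≤ i) :
    PySem.List.pyGetD xs i d = xs.getD i.toNat d := by
  simp only [PySem.List.pyGetD, PySem.List.pyGet?, PySem.List.pyIdx?, if_pos h,
    List.getD_eq_getElem?_getD]
  by_cases hlt : i < (xs.length : Int)
  · rw [if_pos hlt]; rfl
  · rw [if_neg hlt]
    rw [show (xs[i.toNat]? : Option Int) = none from List.getElem?_eq_none (by omega)]
    rfl

lemma arr_getD_toList (a : Array Int) (i : Nat) (d : Int) :
    a.getD i d = a.toList.getD i d := by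
  rw [Array.getD_eq_getD_getElem?, List.getD_eq_getElem?_getD, Array.getElem?_toList]

lemma step_toList (d : Array Int) (i : Int) (h3 : 3 ≤ i) :
    (d.set! i.toNat
      (PySem.Int.mod (d.getD (i - 2).toNat 0 * 2 + d.getD (i - 1).toNat 0) 10007)).toList
      = stepF d.toList i := by
  unfold stepF
  rw [PySem.List.pySetD_of_nonneg _ _ (by omega),
    pyGetD_nonneg_getD _ _ _ (by omega), pyGetD_nonneg_getD _ _ _ (by omega),
    Array.set!, Array.toList_setIfInBounds, arr_getD_toList, arr_getD_toList]

lemma fold_toList (l : List Int) (hl : ∀ i ∈ l, 3 ≤ i) (d : Array Int) :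
    (l.foldl (fun d i => d.set! i.toNat
      (PySem.Int.mod (d.getD (i - 2).toNat 0 * 2 + d.getD (i - 1).toNat 0) 10007)) d).toList
      = l.foldl stepF d.toList := by
  induction l generalizing d with
  | nil => rfl
  | cons x xs ih =>
    simp only [List.foldl_cons]
    rw [← step_toList d x (hl x (by simp)), ih (fun i hi => hl i (by simp [hi]))]

lemma solve_unfold (num : Int) :
    solve num = PySem.List.pyGetD
      ((PySem.List.pyRange 3 (num + 1) 1).foldl stepF (initL (max (num + 1) 3).toNat)) num 0 := by
  have hinit : ((((PySem.List.pyRange 0 (max (num + 1) 3) 1).map (fun _ => (0:Int))).toArray.set!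
      1 1).set! 2 3).toList = initL (max (num + 1) 3).toNat := by
    rw [Array.set!, Array.set!, Array.toList_setIfInBounds, Array.toList_setIfInBounds,
      List.toList_toArray, List.map_const', PySem.List.length_pyRange_one]
    simp [initL]
  simp only [solve]
  rw [fold_toList _ (fun i hi => (PySem.List.mem_pyRange_one.mp hi).1) _, hinit]

lemma solve_eq_gtile (num : Int) (h : 0 ≤ num) : solve num = gtile num.toNat := by
  by_cases h3 : num ≤ 2
  · interval_cases num <;> decide
  · rw [solve_unfold]
    have hL : (max (num + 1) 3).toNat = num.toNat + 1 := by omega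
    have hcast : num + 1 = ((num.toNat + 1 : Nat) : Int) := by omega
    obtain ⟨hlen, hget⟩ := loop_inv (num.toNat + 1) (num.toNat + 1) (by omega) (le_refl _)
    rw [hL, hcast, PySem.List.pyGetD_eq_getElem _ _ h (by rw [hlen]; omega),
      ← List.getD_eq_getElem _ 0 (by rw [hlen]; omega), hget num.toNat, if_pos (by omega)]

lemma gtile_closed_aux (n : Nat) :
    gtile (n + 1) = (3336 * (2 ^ (n + 2) + (-1 : Int) ^ (n + 1))) % 10007 ∧
    gtile (n + 2) = (3336 * (2 ^ (n + 3) + (-1 : Int) ^ (n + 2))) % 10007 := by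
  induction n with
  | zero => exact ⟨by decide, by decide⟩
  | succ n ih =>
    obtain ⟨ih1, ih2⟩ := ih
    refine ⟨by simpa using ih2, ?_⟩
    have hun : gtile (n + 3) = PySem.Int.mod (gtile (n + 1) * 2 + gtile (n + 2)) 10007 := rfl
    rw [show n + 1 + 2 = n + 3 by omega, show n + 1 + 3 = n + 4 by omega, hun,
      PySem.Int.mod_eq_emod_of_pos (by norm_num), ih1, ih2,
      show (2:Int) ^ (n + 3) = 2 * 2 ^ (n + 2) by ring,
      show (2:Int) ^ (n + 4) = 4 * 2 ^ (n + 2) by ring,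
      show (-1:Int) ^ (n + 2) = -(-1) ^ (n + 1) by ring,
      show (-1:Int) ^ (n + 3) = (-1) ^ (n + 1) by ring]
    generalize (2:Int) ^ (n + 2) = P
    generalize (-1:Int) ^ (n + 1) = S
    omega

lemma gtile_closed (n : Nat) (h : 1 ≤ n) :
    gtile n = (3336 * (2 ^ (n + 1) + (-1 : Int) ^ n)) % 10007 := by
  obtain ⟨m, rfl⟩ : ∃ m, n = m + 1 := ⟨n - 1, by omega⟩
  exact (gtile_closed_aux m).1

lemma solve_alt_eq_gtile (num : Int) (h : 1 ≤ num) : solve_alt num = gtile num.toNat := by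
  have hn1 : num.toNat = (num.toNat - 1) + 1 := by omega
  set n := num.toNat with hn
  have hnum : num = (n : Int) := by omega
  rw [gtile_closed n (by omega)]
  simp only [solve_alt, if_neg (by omega : ¬ num ≤ 0), PySem.Int.powMod,
    PySem.Int.mod_eq_emod_of_pos (by norm_num : (0:Int) < (10007:Int))]
  have hexp : (num + 1).toNat = n + 1 := by omega
  rw [hexp, hnum]
  have hmod2 : PySem.Int.mod ((n : Int)) 2 = ((n % 2 : Nat) : Int) := PySem.Int.mod_natCast n 2
  rcases Nat.even_or_odd n with he | ho
  · rw [hmod2, if_pos (by simp [Nat.even_iff.mp he]), he.neg_one_pow]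
    generalize (2:Int) ^ (n + 1) = P
    omega
  · rw [hmod2, if_neg (by simp [Nat.odd_iff.mp ho]), ho.neg_one_pow]
    generalize (2:Int) ^ (n + 1) = P
    omega

-- ===== VERDICT (by name: the statement is the Claim_ definition above) =====
theorem solve_spec : Claim_unchanged_solve := by
  intro num _ hpre hnd
  unfold Pre_solve at hpre
  unfold D_solve at hnd
  push Not at hnd
  obtain ⟨h1, h2⟩ := hnd
  by_cases h0 : 1 ≤ num
  · rw [solve_eq_gtile num (by omega), solve_alt_eq_gtile num h0]
  · interval_cases num <;> first | decide | (exfalso; omega)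

theorem solve_changed : Claim_changed_solve := by unfold Claim_changed_solve; decide

theorem solve_tight : Claim_exact_solve := by
  intro num _ _ hd
  unfold D_solve at hd
  rcases hd with h | h <;> subst h <;> decide
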